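-- pv_equiv track=rewrite | github.com/spine-tools/Spine-Toolbox | spinetoolbox/spine_db_editor/widgets/scenario_generator.py | _find_base_alternative
-- ===== SOURCE A (Python) =====
-- def _find_base_alternative(names):
--     """Returns the name of a 'base' alternative or empty string if not found.
--
--     Basically, checks if "Base" is in names, otherwise searches for the first case-insensitive version of "base".
--
--     Args:
--         names (list of str): alternative names
--
--     Returns:
--         str: base alternative name
--     """
--     if "Base" in names:
--         return "Base"
--     try:
--         base_index = [n.lower() for n in names].index("base")
--     except ValueError:
--         return names[0] if names else ""
--     else:
--         return names[base_index]
-- ===== SOURCE B (Python) =====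
-- def _find_base_alternative(names):
--     """Returns the name of a 'base' alternative or empty string if not found.
--
--     Selection by minimum: each (index, name) pair gets a composite rank
--     (0 for an exact "Base", 1 for a case-insensitive "base", 2 otherwise;
--     ties broken by position), and the minimum-ranked name is returned.
--     """
--     if not names:
--         return ""
--
--     def rank(item):
--         i, n = item
--         if n == "Base":
--             return (0, 0)
--         if n.lower() == "base":
--             return (1, i)
--         return (2, i)
--
--     return min(enumerate(names), key=rank)[1]
-- ===== Notes on version B (the rewrite author's own statement) =====
-- stated objective: alternative
-- what changed: Replaced the staged scans (exact-membership test, then a lowercased copy with .index, then a names[0] fallback) by a single selection-by-minimum over enumerate(names) under a composite rank key (exact match < case-insensitive match < other, ties by position).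
import Mathlib
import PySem

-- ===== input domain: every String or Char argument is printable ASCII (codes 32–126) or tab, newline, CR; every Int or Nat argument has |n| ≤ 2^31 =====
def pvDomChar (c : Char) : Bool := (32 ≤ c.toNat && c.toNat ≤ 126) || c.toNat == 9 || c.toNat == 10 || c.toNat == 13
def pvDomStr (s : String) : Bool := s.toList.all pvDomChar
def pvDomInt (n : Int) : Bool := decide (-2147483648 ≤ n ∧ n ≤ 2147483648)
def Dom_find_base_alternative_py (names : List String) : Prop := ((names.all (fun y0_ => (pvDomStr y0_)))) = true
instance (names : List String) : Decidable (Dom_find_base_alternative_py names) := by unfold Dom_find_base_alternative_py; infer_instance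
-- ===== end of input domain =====

-- B replaces A's staged scans by one selection-by-minimum over enumerate(names) with a composite rank key (alternative decomposition, same cost).


-- ===== PORT A =====
-- A: membership check for "Base", then .index on a lowercased copy, with names[0]/"" fallback.
-- names[base_index] ported as (pyGet? …).getD "" — index? guarantees the index is in range.
def find_base_alternative_py (names : List String) : String :=
  if "Base" ∈ names then "Base"
  else
    match PySem.List.index? (names.map PySem.Str.lower) "base" with
    | none => match names with
              | [] => ""
              | h :: _ => h
    | some i => (PySem.List.pyGet? names (i : Int)).getD ""

-- ===== PORT B =====
-- B: min(enumerate(names), key=rank)[1] where rank is the composite key (0/1/2 class, tie-broken by index).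
def fbRank1 (n : String) : Int :=
  if n = "Base" then 0 else if PySem.Str.lower n = "base" then 1 else 2

def fbRank2 (p : Int × String) : Int :=
  if p.2 = "Base" then 0 else p.1

def find_base_alternative_py_alt (names : List String) : String :=
  match names with
  | [] => ""
  | _ :: _ =>
    match PySem.List.min2? (PySem.List.enumerate names 0) (fun p => fbRank1 p.2) fbRank2 with
    | some p => p.2
    | none => ""   -- unreachable: enumerate of a nonempty list is nonempty

-- ===== PRECONDITION & SPEC =====
def Spec_find_base_alternative_py (names : List String) (out : String) : Prop := out = find_base_alternative_py_alt names
instance (names : List String) (out : String) : Decidable (Spec_find_base_alternative_py names out) := by unfold Spec_find_base_alternative_py; infer_instance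

-- ===== CLAIM (what is proved, stated in full; the proofs are below) =====
def Claim_equal_find_base_alternative_py : Prop := ∀ (names : List String), Dom_find_base_alternative_py names → Spec_find_base_alternative_py names (find_base_alternative_py names)

-- ===== LEMMAS AND PROOFS =====

-- Common characterization: best m l = result when m is the current best and l is the remaining names.
def fbBest (m : String) (l : List String) : String :=
  if m = "Base" then m
  else if "Base" ∈ l then "Base"
  else if PySem.Str.lower m = "base" then m
  else (l.find? (fun n => PySem.Str.lower n == "base")).getD m

-- the fold step of min2? with B's keys
def fbStep (acc : Option (Int × String)) (x : Int × String) : Option (Int × String) :=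
  match acc with
  | none => some x
  | some m =>
    if (decide (fbRank1 x.2 < fbRank1 m.2) ||
        !decide (fbRank1 m.2 < fbRank1 x.2) && decide (fbRank2 x < fbRank2 m)) = true
    then some x else some m

lemma min2?_eq_foldl_fbStep (xs : List (Int × String)) :
    PySem.List.min2? xs (fun p => fbRank1 p.2) fbRank2 = xs.foldl fbStep none := by
  unfold PySem.List.min2?
  congr 1
  funext acc x
  cases acc <;> rfl

lemma fbFold_char (l : List String) (s im : Int) (m : String)
    (him : m = "Base" ∨ im < s) :
    ((PySem.List.enumerate l s).foldl fbStep (some (im, m))).map Prod.snd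
      = some (fbBest m l) := by
  induction l generalizing s im m with
  | nil =>
    simp only [PySem.List.enumerate_nil, List.foldl_nil, Option.map_some, fbBest]
    split_ifs with h1 h2 h3 <;> simp_all
  | cons n rest ih =>
    rw [PySem.List.enumerate_cons, List.foldl_cons]
    by_cases hm : m = "Base"
    · -- current best is an exact match: nothing ever replaces it
      have hstep : fbStep (some (im, m)) (s, n) = some (im, m) := by
        simp only [fbStep, fbRank1, fbRank2, hm]
        split_ifs <;> simp_all
      rw [hstep, ih (s+1) im m (Or.inl hm)]
      simp [fbBest, hm]
    · have him' : im < s := him.resolve_left hm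
      by_cases hn : n = "Base"
      · -- exact match arrives: rank 0 beats rank ≥ 1
        have hstep : fbStep (some (im, m)) (s, n) = some (s, n) := by
          simp only [fbStep, fbRank1, fbRank2, hn]
          split_ifs <;> simp_all
        rw [hstep, ih (s+1) s n (Or.inl hn)]
        simp [fbBest, hm, hn]
      · by_cases hml : PySem.Str.lower m = "base"
        · -- best is a ci-match: only an exact match could replace, n is not one
          have hstep : fbStep (some (im, m)) (s, n) = some (im, m) := by
            simp only [fbStep, fbRank1, fbRank2, hm, hn, hml]
            split_ifs <;> simp_all <;> omega
          rw [hstep, ih (s+1) im m (Or.inr (by omega))]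
          simp only [fbBest, hm, hml]
          have hn' : ¬ ("Base" = n) := fun e => hn e.symm
          simp [hn']
        · by_cases hnl : PySem.Str.lower n = "base"
          · -- n is the first ci-match: it replaces a rank-2 best
            have hstep : fbStep (some (im, m)) (s, n) = some (s, n) := by
              simp only [fbStep, fbRank1, fbRank2, hm, hn, hml, hnl]
              split_ifs <;> simp_all
            rw [hstep, ih (s+1) s n (Or.inr (by omega))]
            simp only [fbBest, hn, hnl]
            have hn' : ¬ ("Base" = n) := fun e => hn e.symm
            by_cases hB : "Base" ∈ rest
            · simp [hm, hB, hn']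
            · simp [hB, hn', hml, hnl, hm]
          · -- both rank 2: keep the earlier one
            have hstep : fbStep (some (im, m)) (s, n) = some (im, m) := by
              simp only [fbStep, fbRank1, fbRank2, hm, hn, hml, hnl]
              split_ifs <;> simp_all <;> omega
            rw [hstep, ih (s+1) im m (Or.inr (by omega))]
            simp only [fbBest, hm, hml]
            have hn' : ¬ ("Base" = n) := fun e => hn e.symm
            have hfc := List.find?_cons_of_neg
              (l := rest) (a := n) (p := fun y => PySem.Str.lower y == "base")
              (by simpa using hnl)
            simp [hn', hfc]

lemma alt_eq_fbBest (n : String) (rest : List String) :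
    find_base_alternative_py_alt (n :: rest) = fbBest n rest := by
  unfold find_base_alternative_py_alt
  rw [min2?_eq_foldl_fbStep, PySem.List.enumerate_cons, List.foldl_cons]
  have h0 : fbStep none ((0 : Int), n) = some (0, n) := rfl
  rw [h0, show (0 : Int) + 1 = 1 by norm_num]
  show (match List.foldl fbStep (some ((0 : Int), n)) (PySem.List.enumerate rest 1) with
        | some p => p.2
        | none => "") = fbBest n rest
  have := fbFold_char rest 1 0 n (Or.inr (by omega))
  cases hf : (PySem.List.enumerate rest 1).foldl fbStep (some ((0 : Int), n)) with
  | none => rw [hf] at this; simp at this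
  | some p =>
    rw [hf] at this
    simp only [Option.map_some, Option.some.injEq] at this
    exact this

-- A-side: the .index-into-lowercased-copy lookup is the first ci-match.
lemma index?_bind_eq_find? (names : List String) :
    (PySem.List.index? (names.map PySem.Str.lower) "base").bind
        (fun i => PySem.List.pyGet? names (i : Int))
      = names.find? (fun n => PySem.Str.lower n == "base") := by
  induction names with
  | nil => rfl
  | cons n rest ih =>
    by_cases hl : PySem.Str.lower n = "base"
    · rw [List.map_cons, hl, PySem.List.index?_cons_self]
      simp [List.find?, hl]
    · rw [List.map_cons, PySem.List.index?_cons_of_ne _ (fun e => hl e),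
        List.find?_cons_of_neg (by simpa using hl), ← ih]
      cases hidx : PySem.List.index? (rest.map PySem.Str.lower) "base" with
      | none => rfl
      | some i =>
        simp only [Option.map_some, Option.bind_some]
        rw [show ((i + 1 : Nat) : Int) = (i : Int) + 1 by push_cast; ring,
          PySem.List.pyGet?_cons_succ]

lemma a_eq_fbBest (n : String) (rest : List String) :
    find_base_alternative_py (n :: rest) = fbBest n rest := by
  unfold find_base_alternative_py
  by_cases hB : "Base" ∈ (n :: rest)
  · rw [if_pos hB]
    unfold fbBest
    rcases List.mem_cons.mp hB with h | h
    · simp [h.symm]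
    · by_cases hn : n = "Base" <;> simp [hn, h]
  · rw [if_neg hB]
    have hn : ¬ n = "Base" := fun e => hB (by simp [e])
    have hBr : "Base" ∉ rest := fun h => hB (List.mem_cons_of_mem _ h)
    have hbind := index?_bind_eq_find? (n :: rest)
    cases hf : (n :: rest).find? (fun x => PySem.Str.lower x == "base") with
    | none =>
      have hidx : PySem.List.index? ((n :: rest).map PySem.Str.lower) "base" = none := by
        rw [PySem.List.index?_eq_none_iff]
        intro hmem
        rcases List.mem_map.mp hmem with ⟨x, hx, e⟩
        have := List.find?_eq_none.mp hf x hx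
        simp [e] at this
      rw [hidx]
      have hnl : ¬ PySem.Str.lower n = "base" := by
        have := List.find?_eq_none.mp hf n (by simp)
        simpa using this
      have hfr : rest.find? (fun x => PySem.Str.lower x == "base") = none := by
        rw [List.find?_cons_of_neg (by simpa using hnl)] at hf
        exact hf
      simp [fbBest, hn, hBr, hnl, hfr]
    | some x =>
      have hx := List.find?_some hf
      have hmem : x ∈ (n :: rest) := List.mem_of_find?_eq_some hf
      have hbm : "base" ∈ (n :: rest).map PySem.Str.lower :=
        List.mem_map.mpr ⟨x, hmem, by simpa using hx⟩
      rcases Option.isSome_iff_exists.mp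
          ((PySem.List.index?_isSome_iff _ _).mpr hbm) with ⟨i, hi⟩
      rw [hi, hf] at hbind
      simp only [Option.bind_some] at hbind
      rw [hi]
      show (PySem.List.pyGet? (n :: rest) ((i : Nat) : Int)).getD "" = fbBest n rest
      rw [hbind]
      by_cases hnl : PySem.Str.lower n = "base"
      · have hx' : x = n := by
          rw [List.find?_cons_of_pos (by simpa using hnl)] at hf
          injection hf with h
          exact h.symm
        simp [fbBest, hn, hBr, hnl, hx']
      · have hfr : rest.find? (fun y => PySem.Str.lower y == "base") = some x := by
          rw [List.find?_cons_of_neg (by simpa using hnl)] at hf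
          exact hf
        simp [fbBest, hn, hBr, hnl, hfr]

-- ===== VERDICT (by name: the statement is the Claim_ definition above) =====
theorem find_base_alternative_py_spec : Claim_equal_find_base_alternative_py := by
  intro names _
  unfold Spec_find_base_alternative_py
  cases names with
  | nil => rfl
  | cons n rest => rw [a_eq_fbBest, alt_eq_fbBest]
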